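-- pv_equiv track=rewrite | github.com/JanKaczmarski/university | asd/code/kol1/kol1b.py | maxrank
-- ===== SOURCE A (Python) =====
-- def maxrank(T):
--     n = len(T)
--     # zmienna przechowujaca wynik
--     sol = 0
--     # dla kazdego elementu sprawdzamy jaka jest jego ranga
--     # bez T[0], bo i tak ranga T[0] = 0
--     for i in range(n-1, 0, -1):
--         cnt = 0
--         # wszystkie elementy do aktualnego
--         if sol > i + 1:
--             return sol
--         for j in range(i-1, -1, -1):
--             # jesli wiekszy to zwieksz aktualna range o 1
--             if T[j] < T[i]:
--                 cnt += 1
--         # aktualizacja sol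
--         sol = max(cnt, sol)
--
--     return sol
-- ===== SOURCE B (Python) =====
-- def maxrank(T):
--     best = 0
--     pref = []  # elements seen so far, kept in ascending order
--     for x in T:
--         k = 0
--         while k < len(pref) and pref[k] < x:
--             k += 1
--         if k > best:
--             best = k
--         pref.insert(k, x)
--     return best
-- ===== Notes on version B (the rewrite author's own statement) =====
-- stated objective: alternative
-- what changed: Instead of A's backward double loop recounting smaller earlier elements for every index, B makes one forward pass maintaining a sorted list of the elements seen so far; the rank of each element is its insertion position (count of strictly smaller seen elements) found by scanning the sorted prefix up to that point.
import Mathlib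
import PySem

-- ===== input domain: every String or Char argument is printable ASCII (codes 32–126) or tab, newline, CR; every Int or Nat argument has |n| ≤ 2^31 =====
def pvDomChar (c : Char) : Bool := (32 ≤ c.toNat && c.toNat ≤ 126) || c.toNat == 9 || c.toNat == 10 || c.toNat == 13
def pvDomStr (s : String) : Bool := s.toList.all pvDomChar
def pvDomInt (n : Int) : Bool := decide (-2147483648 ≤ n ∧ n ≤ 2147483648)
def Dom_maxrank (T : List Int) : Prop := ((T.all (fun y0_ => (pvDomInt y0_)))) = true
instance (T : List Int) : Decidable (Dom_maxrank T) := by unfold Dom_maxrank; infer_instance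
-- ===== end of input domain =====

-- B replaces A's backward double loop by one forward pass over a sorted prefix; equal return value on every input (no mutation of the argument in either program).

-- ===== PORT A =====
-- outer for-loop with its early 'return sol'
def pvLoopA (T : List Int) : List Int → Int → Int
  | [], sol => sol
  | i :: rest, sol =>
    if sol > i + 1 then sol
    else
      let cnt := (PySem.List.pyRange (i - 1) (-1) (-1)).foldl
        (fun c j => if PySem.List.pyGetD T j 0 < PySem.List.pyGetD T i 0 then c + 1 else c) 0
      pvLoopA T rest (max cnt sol)

def maxrank (T : List Int) : Int :=
  let n : Int := T.length
  pvLoopA T (PySem.List.pyRange (n - 1) 0 (-1)) 0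

-- ===== PORT B =====
-- the while-loop: k walks forward while pref[k] < x
def pvLb (x : Int) : List Int → Nat
  | [] => 0
  | p :: ps => if p < x then pvLb x ps + 1 else 0

def pvLoopB : List Int → Int → List Int → Int
  | [], best, _ => best
  | x :: rest, best, pref =>
    let k := pvLb x pref
    let best' := if (k : Int) > best then (k : Int) else best
    pvLoopB rest best' (pref.insertIdx k x)

def maxrank_alt (T : List Int) : Int := pvLoopB T 0 []

-- ===== PRECONDITION & SPEC =====
def Spec_maxrank (T : List Int) (out : Int) : Prop := out = maxrank_alt T
instance (T : List Int) (out : Int) : Decidable (Spec_maxrank T out) := by unfold Spec_maxrank; infer_instance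

-- ===== CLAIM (what is proved, stated in full; the proofs are below) =====
def Claim_equal_maxrank : Prop := ∀ (T : List Int), Dom_maxrank T → Spec_maxrank T (maxrank T)

-- ===== LEMMAS AND PROOFS =====

-- rank of position i: number of strictly smaller elements before it
def pvRnk (T : List Int) (i : Nat) : Nat :=
  (T.take i).countP (fun y => decide (y < T.getD i 0))

-- running max of ranks over positions 0..m-1
def pvBest (T : List Int) : Nat → Int
  | 0 => 0
  | m + 1 => max (pvBest T m) ((pvRnk T m : Nat) : Int)

lemma pvRnk_le (T : List Int) (i : Nat) : pvRnk T i ≤ i := by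
  calc pvRnk T i ≤ (T.take i).length := List.countP_le_length
    _ ≤ i := by simp

lemma pvBest_nonneg (T : List Int) (m : Nat) : 0 ≤ pvBest T m := by
  induction m with
  | zero => simp [pvBest]
  | succ m ih => exact le_trans ih (by simp [pvBest])

lemma pvBest_le (T : List Int) (m : Nat) : pvBest T m ≤ (m : Int) := by
  induction m with
  | zero => simp [pvBest]
  | succ m ih =>
    have h := pvRnk_le T m
    simp only [pvBest]
    push_cast
    omega

lemma countP_range_getD (T : List Int) (v : Int) :
    ∀ m, m ≤ T.length →
    (List.range m).countP (fun k => decide (T.getD k 0 < v))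
      = (T.take m).countP (fun y => decide (y < v)) := by
  intro m
  induction m with
  | zero => simp
  | succ m ih =>
    intro hm
    have h : m < T.length := by omega
    rw [List.range_succ, List.countP_append, ih (by omega), List.take_add_one, List.countP_append]
    simp [List.getElem?_eq_getElem h, List.getD]

-- A's inner loop computes the rank of position i
lemma innerA (T : List Int) (i : Nat) (hi : i < T.length) :
    (PySem.List.pyRange ((i : Int) - 1) (-1) (-1)).foldl
      (fun c j => if PySem.List.pyGetD T j 0 < PySem.List.pyGetD T (i : Int) 0 then c + 1 else c) 0
      = ((pvRnk T i : Nat) : Int) := by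
  rw [PySem.List.foldl_ite_add_one]
  have hrev : PySem.List.pyRange ((i : Int) - 1) (-1) (-1)
      = (PySem.List.pyRange 0 (i : Int) 1).reverse := by
    rw [PySem.List.pyRange_neg_one_eq_reverse]
    norm_num
  rw [hrev, List.countP_reverse, PySem.List.pyRange_zero_nat, List.countP_map]
  simp only [Function.comp_def, PySem.List.pyGetD_natCast]
  rw [countP_range_getD T _ i (le_of_lt hi)]
  simp [pvRnk]

-- A's outer loop (with its early return) equals the running max of ranks
lemma loopA_spec (T : List Int) : ∀ (m : Nat), m < T.length → ∀ (sol : Int), 0 ≤ sol →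
    pvLoopA T (PySem.List.pyRange (m : Int) 0 (-1)) sol = max sol (pvBest T (m + 1)) := by
  intro m
  induction m with
  | zero =>
    intro _ sol hsol
    rw [PySem.List.pyRange_neg_one_eq_nil (by omega)]
    simp [pvLoopA, pvBest, pvRnk]
    omega
  | succ m ih =>
    intro hm sol hsol
    rw [PySem.List.pyRange_neg_one_cons (by omega), pvLoopA]
    have hinner := innerA T (m + 1) hm
    have e : ((m + 1 : Nat) : Int) - 1 = (m : Int) := by push_cast; ring
    rw [e] at hinner ⊢
    split_ifs with hret
    · have hb := pvBest_le T (m + 1 + 1)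
      push_cast at hb hret
      omega
    · rw [hinner, ih (by omega) _ (le_trans hsol (le_max_right _ _))]
      have hstep : pvBest T (m + 1 + 1) = max (pvBest T (m + 1)) ((pvRnk T (m + 1) : Nat) : Int) := by
        simp [pvBest]
      omega

-- pvLb on a sorted list counts the strictly smaller elements
lemma pvLb_sorted (x : Int) : ∀ (pref : List Int), pref.Pairwise (· ≤ ·) →
    pvLb x pref = pref.countP (fun y => decide (y < x)) := by
  intro pref
  induction pref with
  | nil => simp [pvLb]
  | cons p ps ih =>
    intro hp
    rw [List.pairwise_cons] at hp
    by_cases h : p < x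
    · simp [pvLb, h, ih hp.2]
    · have : ps.countP (fun y => decide (y < x)) = 0 := by
        rw [List.countP_eq_zero]
        intro a ha
        have := hp.1 a ha
        simp
        omega
      simp [pvLb, h, this]

lemma pvLb_le (x : Int) (pref : List Int) : pvLb x pref ≤ pref.length := by
  induction pref with
  | nil => simp [pvLb]
  | cons p ps ih => by_cases h : p < x <;> simp [pvLb, h, ih]

lemma insertIdx_lb_sorted (x : Int) : ∀ (pref : List Int), pref.Pairwise (· ≤ ·) →
    (pref.insertIdx (pvLb x pref) x).Pairwise (· ≤ ·) := by
  intro pref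
  induction pref with
  | nil => simp [pvLb]
  | cons p ps ih =>
    intro hp
    rw [List.pairwise_cons] at hp
    by_cases h : p < x
    · simp only [pvLb, if_pos h, List.insertIdx_succ_cons]
      rw [List.pairwise_cons]
      refine ⟨?_, ih hp.2⟩
      intro a ha
      rw [List.mem_insertIdx (by simpa using pvLb_le x ps)] at ha
      rcases ha with rfl | ha
      · omega
      · exact hp.1 a ha
    · simp only [pvLb, if_neg h, List.insertIdx_zero]
      rw [List.pairwise_cons]
      refine ⟨?_, List.pairwise_cons.mpr hp⟩
      intro a ha
      rcases List.mem_cons.mp ha with rfl | ha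
      · omega
      · have := hp.1 a ha; omega

-- B's loop starting at position m, with a sorted prefix ~ T.take m
lemma loopB_spec (T : List Int) : ∀ (rest : List Int) (m : Nat) (pref : List Int) (best : Int),
    T.drop m = rest → pref.Perm (T.take m) → pref.Pairwise (· ≤ ·) →
    pvLoopB rest best pref
      = (List.range' m (T.length - m)).foldl (fun b i => max b ((pvRnk T i : Nat) : Int)) best := by
  intro rest
  induction rest with
  | nil =>
    intro m pref best hdrop _ _
    rw [Nat.sub_eq_zero_of_le (List.drop_eq_nil_iff.mp hdrop)]
    simp [pvLoopB]
  | cons x rest ih =>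
    intro m pref best hdrop hperm hsort
    have hm : m < T.length := by
      by_contra h
      rw [List.drop_of_length_le (by omega)] at hdrop
      exact List.cons_ne_nil x rest hdrop.symm
    have h0 : T[m]? = some x := by
      have h1 : (T.drop m)[0]? = T[m+0]? := List.getElem?_drop
      rw [hdrop] at h1
      simpa using h1.symm
    have hx : T.getD m 0 = x := by simp [List.getD, h0]
    have hk : pvLb x pref = pvRnk T m := by
      rw [pvLb_sorted x pref hsort, hperm.countP_eq, pvRnk, hx]
    rw [pvLoopB]
    have hlen : T.length - m = (T.length - (m + 1)) + 1 := by omega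
    rw [hlen, List.range'_succ, List.foldl_cons]
    have hbest : (if ((pvLb x pref : Nat) : Int) > best then ((pvLb x pref : Nat) : Int) else best)
        = max best ((pvRnk T m : Nat) : Int) := by
      rw [hk]; omega
    rw [hbest]
    refine ih (m + 1) _ _ ?_ ?_ (insertIdx_lb_sorted x pref hsort)
    · rw [← List.drop_drop, hdrop]
      simp
    · have h1 : (pref.insertIdx (pvLb x pref) x).Perm (x :: pref) :=
        List.perm_insertIdx x pref (by simpa using pvLb_le x pref)
      have h2 : (x :: pref).Perm (x :: T.take m) := hperm.cons x
      have h3 : T.take (m + 1) = T.take m ++ [x] := by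
        rw [List.take_add_one, h0]
        rfl
      rw [h3]
      exact (h1.trans h2).trans (List.perm_append_singleton x (T.take m)).symm

-- pvBest as a fold over List.range
lemma pvBest_eq_foldl (T : List Int) (m : Nat) :
    pvBest T m = (List.range m).foldl (fun b i => max b ((pvRnk T i : Nat) : Int)) 0 := by
  induction m with
  | zero => simp [pvBest]
  | succ m ih =>
    rw [List.range_succ, List.foldl_append]
    simp [pvBest, ih]

-- ===== VERDICT (by name: the statement is the Claim_ definition above) =====
theorem maxrank_spec : Claim_equal_maxrank := by
  intro T _
  show maxrank T = maxrank_alt T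
  have hB : maxrank_alt T
      = (List.range' 0 (T.length - 0)).foldl (fun b i => max b ((pvRnk T i : Nat) : Int)) 0 :=
    loopB_spec T T 0 [] 0 (by simp) (by simp) (by simp)
  rw [hB]
  have hrange : List.range' 0 (T.length - 0) = List.range T.length := by
    rw [Nat.sub_zero, List.range_eq_range']
  rw [hrange, ← pvBest_eq_foldl]
  cases hT : T.length with
  | zero =>
    have hnil : T = [] := List.length_eq_zero_iff.mp hT
    subst hnil
    decide
  | succ m =>
    have hcast : ((T.length : Int) - 1) = ((m : Nat) : Int) := by rw [hT]; push_cast; ring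
    rw [maxrank]
    rw [hcast, loopA_spec T m (by omega) 0 le_rfl]
    have := pvBest_nonneg T (m + 1)
    omega
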